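-- pv_equiv track=rewrite | github.com/glfp/pytes-proxy | pytes_service.py | validate_cells_complete
-- ===== SOURCE A (Python) =====
-- def validate_cells_complete(present_ids: list[int], cells: list[dict]) -> str | None:
--     expected_cells = set(range(16))
--     cells_by_module: dict[int, set[int]] = {module_id: set() for module_id in present_ids}
--
--     for cell in cells:
--         module_id = cell["module_id"]
--         cell_idx = cell["cell"]
--         if module_id not in cells_by_module:
--             continue
--         if 0 <= cell_idx < 16:
--             cells_by_module[module_id].add(cell_idx)
--
--     incomplete_modules: list[str] = []
--     for module_id in present_ids:
--         found_cells = cells_by_module.get(module_id, set())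
--         if found_cells != expected_cells:
--             missing_cells = sorted(expected_cells - found_cells)
--             incomplete_modules.append(f"{module_id} missing {missing_cells}")
--
--     if incomplete_modules:
--         return "Incomplete bat data: " + "; ".join(incomplete_modules)
--
--     return None
-- ===== SOURCE B (Python) =====
-- def validate_cells_complete(present_ids: list[int], cells: list[dict]) -> str | None:
--     expected_cells = set(range(16))
--     messages: list[str] = []
--     for module_id in present_ids:
--         found_cells = {c["cell"] for c in cells
--                        if c["module_id"] == module_id and 0 <= c["cell"] < 16}
--         if found_cells != expected_cells:
--             messages.append(f"{module_id} missing {sorted(expected_cells - found_cells)}")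
--     if messages:
--         return "Incomplete bat data: " + "; ".join(messages)
--     return None
-- ===== Notes on version B (the rewrite author's own statement) =====
-- stated objective: simpler
-- what changed: Drops the pre-built cells_by_module dict index entirely: for each module_id in present_ids the found-cell set is computed directly by a set comprehension over cells, so there is no mutable dict state and one loop disappears.
import Mathlib
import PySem

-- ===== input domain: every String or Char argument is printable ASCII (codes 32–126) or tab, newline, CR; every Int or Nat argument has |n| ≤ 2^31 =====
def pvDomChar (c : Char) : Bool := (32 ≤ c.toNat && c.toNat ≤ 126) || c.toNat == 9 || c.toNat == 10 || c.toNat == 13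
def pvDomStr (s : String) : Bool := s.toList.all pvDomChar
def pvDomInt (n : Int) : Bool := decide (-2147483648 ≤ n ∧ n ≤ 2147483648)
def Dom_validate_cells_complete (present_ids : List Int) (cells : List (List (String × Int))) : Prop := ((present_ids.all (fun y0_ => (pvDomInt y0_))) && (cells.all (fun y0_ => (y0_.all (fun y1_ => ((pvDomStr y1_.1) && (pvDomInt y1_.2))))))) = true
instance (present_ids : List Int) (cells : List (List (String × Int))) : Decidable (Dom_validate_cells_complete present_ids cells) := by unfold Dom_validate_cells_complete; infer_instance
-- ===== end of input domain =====

-- B replaces A's pre-built cells_by_module dict index by a direct per-module scan of cells (simpler; no speed claim).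

-- shared helpers (both Pythons use the same dict lookups and the same f-string)
-- cell["k"] on the dict `cell`: first match in the association list (none = KeyError, excluded by Pre_)
def pvCellGet? (c : List (String × Int)) (k : String) : Option Int := (PySem.Dict.mk c).get? k

-- f"{module_id} missing {missing_cells}" (Python list repr of a list of ints)
def pvMsg (module_id : Int) (missing : List Int) : String :=
  PySem.Int.toStr module_id ++ " missing [" ++ PySem.Str.join ", " (missing.map PySem.Int.toStr) ++ "]"


-- A's per-cell loop body (the body of A's `for cell in cells` loop, as a named function)
def pvStep (d : PySem.Dict Int (PySem.Set Int)) (cell : List (String × Int)) : PySem.Dict Int (PySem.Set Int) :=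
  match pvCellGet? cell "module_id", pvCellGet? cell "cell" with
  | some module_id, some cell_idx =>
      if d.contains module_id then
        if 0 ≤ cell_idx ∧ cell_idx < 16 then
          d.modify module_id PySem.Set.empty (fun s => s.add cell_idx)
        else d
      else d
  | _, _ => d   -- a missing key is Python's KeyError: outside Pre_

-- B's set-comprehension condition `c["module_id"] == module_id and 0 <= c["cell"] < 16` and its element `c["cell"]`
def pvHitP (m : Int) (c : List (String × Int)) : Bool :=
  pvCellGet? c "module_id" == some m &&
  ((pvCellGet? c "cell").elim false (fun x => decide (0 ≤ x) && decide (x < 16)))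

def pvHitVal (c : List (String × Int)) : Int := (pvCellGet? c "cell").getD 0

-- ===== PORT A =====
def validate_cells_complete (present_ids : List Int) (cells : List (List (String × Int))) : Option String :=
  let expected_cells : PySem.Set Int := PySem.Set.ofList (PySem.List.pyRange 0 16)
  let cbm0 : PySem.Dict Int (PySem.Set Int) :=
    present_ids.foldl (fun d module_id => d.insert module_id PySem.Set.empty) PySem.Dict.empty
  let cells_by_module : PySem.Dict Int (PySem.Set Int) :=
    cells.foldl pvStep cbm0
  let incomplete_modules : List String :=
    present_ids.foldl (fun acc module_id =>
      let found_cells := cells_by_module.getD module_id PySem.Set.empty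
      if !PySem.Set.equal found_cells expected_cells then
        acc ++ [pvMsg module_id (PySem.List.sorted (PySem.Set.diff expected_cells found_cells) (fun x => x))]
      else acc) []
  if incomplete_modules ≠ [] then
    some ("Incomplete bat data: " ++ PySem.Str.join "; " incomplete_modules)
  else none

-- ===== PORT B =====
def validate_cells_complete_alt (present_ids : List Int) (cells : List (List (String × Int))) : Option String :=
  let expected_cells : PySem.Set Int := PySem.Set.ofList (PySem.List.pyRange 0 16)
  let messages : List String :=
    present_ids.foldl (fun acc module_id =>
      let found_cells : PySem.Set Int :=
        PySem.Set.ofList ((cells.filter (pvHitP module_id)).map pvHitVal)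
      if !PySem.Set.equal found_cells expected_cells then
        acc ++ [pvMsg module_id (PySem.List.sorted (PySem.Set.diff expected_cells found_cells) (fun x => x))]
      else acc) []
  if messages ≠ [] then
    some ("Incomplete bat data: " ++ PySem.Str.join "; " messages)
  else none

-- ===== PRECONDITION & SPEC =====
-- Pre_ excludes exactly the inputs where some cell dict lacks the key "module_id" or "cell": there Python A raises KeyError.
def Pre_validate_cells_complete (present_ids : List Int) (cells : List (List (String × Int))) : Prop :=
  ∀ c ∈ cells, (pvCellGet? c "module_id").isSome = true ∧ (pvCellGet? c "cell").isSome = true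
instance (present_ids : List Int) (cells : List (List (String × Int))) : Decidable (Pre_validate_cells_complete present_ids cells) := by unfold Pre_validate_cells_complete; infer_instance

def pvWitness_validate_cells_complete : List Int × (List (List (String × Int))) :=
  ([1], [[("module_id", 1), ("cell", 3)]])

def Spec_validate_cells_complete (present_ids : List Int) (cells : List (List (String × Int))) (out : Option String) : Prop := out = validate_cells_complete_alt present_ids cells
instance (present_ids : List Int) (cells : List (List (String × Int))) (out : Option String) : Decidable (Spec_validate_cells_complete present_ids cells out) := by unfold Spec_validate_cells_complete; infer_instance

-- ===== CLAIM (what is proved, stated in full; the proofs are below) =====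
def Claim_equal_validate_cells_complete : Prop := ∀ (present_ids : List Int) (cells : List (List (String × Int))), Dom_validate_cells_complete present_ids cells → Pre_validate_cells_complete present_ids cells → Spec_validate_cells_complete present_ids cells (validate_cells_complete present_ids cells)

-- ===== LEMMAS AND PROOFS =====

lemma pvStep_contains (d : PySem.Dict Int (PySem.Set Int)) (c : List (String × Int)) (m : Int)
    (hm : d.contains m = true) : (pvStep d c).contains m = true := by
  unfold pvStep
  rcases h1 : pvCellGet? c "module_id" with _ | mid <;>
    rcases h2 : pvCellGet? c "cell" with _ | ci <;> simp [hm]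
  split_ifs <;> simp [PySem.Dict.contains_modify, hm]

lemma pvLoop_getD (cs : List (List (String × Int))) (d : PySem.Dict Int (PySem.Set Int)) (m : Int)
    (hm : d.contains m = true) :
    (cs.foldl pvStep d).getD m PySem.Set.empty =
      PySem.Set.update (d.getD m PySem.Set.empty) ((cs.filter (pvHitP m)).map pvHitVal) := by
  induction cs generalizing d with
  | nil => rfl
  | cons c cs ih =>
    rw [List.foldl_cons, List.filter_cons, ih (pvStep d c) (pvStep_contains d c m hm)]
    rcases h1 : pvCellGet? c "module_id" with _ | mid <;>
      rcases h2 : pvCellGet? c "cell" with _ | ci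
    · simp [pvStep, pvHitP, h1, h2]
    · simp [pvStep, pvHitP, h1, h2]
    · simp [pvStep, pvHitP, h1, h2]
    · by_cases hmm : mid = m
      · subst hmm
        by_cases hr : 0 ≤ ci ∧ ci < 16
        · simp [pvStep, pvHitP, pvHitVal, h1, h2, hm, hr]
        · simp [pvStep, pvHitP, h1, h2, hm, hr]
      · by_cases hc : d.contains mid = true
        · by_cases hr : 0 ≤ ci ∧ ci < 16
          · simp [pvStep, pvHitP, h1, h2, hc, hr, PySem.Dict.getD_modify, hmm,
              show ¬ m = mid from fun h => hmm h.symm]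
          · simp [pvStep, pvHitP, h1, h2, hc, hr, hmm]
        · simp [pvStep, pvHitP, h1, h2, hc, hmm]

lemma pvInit_contains (l : List Int) (d : PySem.Dict Int (PySem.Set Int)) (m : Int)
    (h : m ∈ l ∨ d.contains m = true) :
    (l.foldl (fun d x => d.insert x PySem.Set.empty) d).contains m = true := by
  induction l generalizing d with
  | nil => simpa using h
  | cons x l ih =>
    rw [List.foldl_cons]
    refine ih _ ?_
    rcases h with h | h
    · rcases List.mem_cons.mp h with h | h
      · right; simp [h]
      · left; exact h
    · right; simp [PySem.Dict.contains_insert, h]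

lemma pvInit_getD (l : List Int) (d : PySem.Dict Int (PySem.Set Int)) (m : Int)
    (h : d.getD m PySem.Set.empty = PySem.Set.empty) :
    (l.foldl (fun d x => d.insert x PySem.Set.empty) d).getD m PySem.Set.empty = PySem.Set.empty := by
  induction l generalizing d with
  | nil => simpa using h
  | cons x l ih =>
    rw [List.foldl_cons]
    refine ih _ ?_
    rw [PySem.Dict.getD_insert]
    split_ifs
    · rfl
    · exact h

-- for m ∈ present_ids, A's dict entry after its cell loop equals B's set comprehension
lemma pvFound_eq (present_ids : List Int) (cells : List (List (String × Int))) (m : Int)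
    (hm : m ∈ present_ids) :
    (cells.foldl pvStep (present_ids.foldl (fun d module_id => d.insert module_id PySem.Set.empty) PySem.Dict.empty)).getD m PySem.Set.empty
      = PySem.Set.ofList ((cells.filter (pvHitP m)).map pvHitVal) := by
  rw [pvLoop_getD _ _ _ (pvInit_contains _ _ _ (Or.inl hm)), pvInit_getD _ _ _ rfl]
  rfl

-- ===== VERDICT (by name: the statement is the Claim_ definition above) =====
theorem validate_cells_complete_spec : Claim_equal_validate_cells_complete := by
  intro present_ids cells _ _
  show validate_cells_complete present_ids cells = validate_cells_complete_alt present_ids cells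
  simp only [validate_cells_complete, validate_cells_complete_alt]
  rw [PySem.List.foldl_congr_mem present_ids _ _ []
    (fun acc m hm => by rw [pvFound_eq present_ids cells m hm])]
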